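-- pv_equiv track=rewrite | github.com/thanard/dorp | utils/gen_utils.py | tensor_to_label_grouped
-- ===== SOURCE A (Python) =====
-- def tensor_to_label_grouped(tensor, z_dim, groups):
--     final_label = []
--     group_idx = 0
--     idx = 0
--     while group_idx < len(groups):
--         n_onehots_in_group = groups[group_idx]
--         label = int(sum(tensor[i] * z_dim ** (n_onehots_in_group - (i - idx) - 1) for i in
--                           range(idx, n_onehots_in_group + idx)))
--         final_label.append(label)
--         idx += n_onehots_in_group
--         group_idx+=1
--     return final_label
-- ===== SOURCE B (Python) =====
-- def tensor_to_label_grouped(tensor, z_dim, groups):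
--     starts = [0]
--     for n in groups:
--         starts.append(starts[-1] + n)
--
--     def label_of(start, n):
--         label = 0
--         for i in range(start, start + n):
--             label = label * z_dim + tensor[i]
--         return int(label)
--
--     return [label_of(s, n) for s, n in zip(starts, groups)]
-- ===== Notes on version B (the rewrite author's own statement) =====
-- stated objective: alternative
-- what changed: B precomputes the list of group start offsets in one scan and then maps a Horner-scheme accumulation over (start, size) pairs, instead of A's while-loop that recomputes z_dim ** power for every element of a weighted sum.
import Mathlib
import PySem

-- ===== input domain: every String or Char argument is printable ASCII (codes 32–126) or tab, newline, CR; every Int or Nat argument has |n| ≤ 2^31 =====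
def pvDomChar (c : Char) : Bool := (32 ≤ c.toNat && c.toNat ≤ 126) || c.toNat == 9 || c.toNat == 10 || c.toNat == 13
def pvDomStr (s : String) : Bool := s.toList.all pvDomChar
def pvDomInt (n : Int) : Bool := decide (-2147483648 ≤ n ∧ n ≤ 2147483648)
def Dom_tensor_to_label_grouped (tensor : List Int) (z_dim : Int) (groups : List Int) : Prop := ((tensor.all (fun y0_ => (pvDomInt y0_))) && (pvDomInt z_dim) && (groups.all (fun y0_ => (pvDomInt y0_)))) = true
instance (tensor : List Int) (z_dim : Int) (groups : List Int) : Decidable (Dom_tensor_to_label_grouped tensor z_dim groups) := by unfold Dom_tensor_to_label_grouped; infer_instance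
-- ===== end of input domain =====

-- B replaces A's per-element z_dim**power weighted sum with precomputed group start offsets and a
-- Horner-scheme accumulation per group (objective: alternative decomposition, same exact values).

-- ===== PORT A =====
-- A's 'while group_idx < len(groups)' loop: recursion on the remaining groups, carrying idx and final_label.
-- z_dim ** (n - (i - idx) - 1): the exponent is ≥ 0 for every i in range(idx, n + idx), so Int '^' on .toNat is exact.
def pvA_loop (tensor : List Int) (z_dim : Int) : List Int → Int → List Int → List Int
  | [], _, final_label => final_label
  | n :: rest, idx, final_label =>
      let label := (PySem.List.pyRange idx (n + idx) 1).foldl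
        (fun s i => s + PySem.List.pyGetD tensor i 0 * z_dim ^ (n - (i - idx) - 1).toNat) 0
      pvA_loop tensor z_dim rest (idx + n) (final_label ++ [label])

def tensor_to_label_grouped (tensor : List Int) (z_dim : Int) (groups : List Int) : List Int :=
  pvA_loop tensor z_dim groups 0 []

-- ===== PORT B =====
-- label_of(start, n): Horner accumulation 'label = label * z_dim + tensor[i]' over range(start, start + n)
def pvB_label_of (tensor : List Int) (z_dim : Int) (start n : Int) : Int :=
  (PySem.List.pyRange start (start + n) 1).foldl
    (fun label i => label * z_dim + PySem.List.pyGetD tensor i 0) 0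

def tensor_to_label_grouped_alt (tensor : List Int) (z_dim : Int) (groups : List Int) : List Int :=
  let starts := groups.foldl (fun acc n => acc ++ [PySem.List.pyGetD acc (-1) 0 + n]) [0]
  (starts.zip groups).map (fun p => pvB_label_of tensor z_dim p.1 p.2)

-- ===== PRECONDITION & SPEC =====
-- Pre_ excludes exactly the inputs on which A raises IndexError: some index in some group's range
-- [start_k, start_k + groups[k]) (start_k = the sum of the earlier group sizes) falls outside
-- Python's valid index range [-len(tensor), len(tensor)) for tensor.
def Pre_tensor_to_label_grouped (tensor : List Int) (z_dim : Int) (groups : List Int) : Prop :=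
  ∀ k : Nat, k < groups.length →
    groups.getD k 0 ≤ 0 ∨
      (-(tensor.length : Int) ≤ (groups.take k).sum ∧
        (groups.take k).sum + groups.getD k 0 ≤ tensor.length)

instance (tensor : List Int) (z_dim : Int) (groups : List Int) : Decidable (Pre_tensor_to_label_grouped tensor z_dim groups) := by unfold Pre_tensor_to_label_grouped; infer_instance

def pvWitness_tensor_to_label_grouped : List Int × Int × List Int := ([1, 2, 3], 4, [2, 1])

def Spec_tensor_to_label_grouped (tensor : List Int) (z_dim : Int) (groups : List Int) (out : List Int) : Prop := out = tensor_to_label_grouped_alt tensor z_dim groups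
instance (tensor : List Int) (z_dim : Int) (groups : List Int) (out : List Int) : Decidable (Spec_tensor_to_label_grouped tensor z_dim groups out) := by unfold Spec_tensor_to_label_grouped; infer_instance

-- ===== CLAIM (what is proved, stated in full; the proofs are below) =====
def Claim_equal_tensor_to_label_grouped : Prop := ∀ (tensor : List Int) (z_dim : Int) (groups : List Int), Dom_tensor_to_label_grouped tensor z_dim groups → Pre_tensor_to_label_grouped tensor z_dim groups → Spec_tensor_to_label_grouped tensor z_dim groups (tensor_to_label_grouped tensor z_dim groups)

-- ===== LEMMAS AND PROOFS =====

-- the list of group start offsets beginning at idx (spec of B's 'starts' loop)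
def pvStarts : Int → List Int → List Int
  | idx, [] => [idx]
  | idx, n :: rest => idx :: pvStarts (idx + n) rest

theorem pv_starts_fold (gs : List Int) : ∀ (pre : List Int) (idx : Int),
    gs.foldl (fun acc n => acc ++ [PySem.List.pyGetD acc (-1) 0 + n]) (pre ++ [idx])
      = pre ++ pvStarts idx gs := by
  induction gs with
  | nil => intro pre idx; simp [pvStarts]
  | cons n rest ih =>
    intro pre idx
    simp only [List.foldl_cons, PySem.List.pyGetD_neg_one_append_singleton]
    have := ih (pre ++ [idx]) (idx + n)
    simp only [List.append_assoc] at this ⊢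
    rw [this]
    simp [pvStarts]

theorem pv_sum_map_mul (L : List Int) (f : Int → Int) (z : Int) :
    (L.map fun i => f i * z).sum = (L.map f).sum * z := by
  induction L with
  | nil => simp
  | cons x xs ih => simp [ih]; ring

-- Horner accumulation over a contiguous range equals the z-adic weighted sum
theorem pv_horner (t : Int → Int) (z : Int) (m : Nat) (idx c : Int) :
    (PySem.List.pyRange idx (idx + (m : Int)) 1).foldl (fun l i => l * z + t i) c
      = c * z ^ m
        + ((PySem.List.pyRange idx (idx + (m : Int)) 1).map
            (fun i => t i * z ^ ((m : Int) - (i - idx) - 1).toNat)).sum := by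
  induction m with
  | zero => simp [PySem.List.pyRange_one_eq_nil (le_refl idx)]
  | succ m ih =>
    have hsplit : PySem.List.pyRange idx (idx + ((m + 1 : Nat) : Int)) 1
        = PySem.List.pyRange idx (idx + (m : Int)) 1 ++ [idx + (m : Int)] := by
      have h := PySem.List.pyRange_one_succ_right (a := idx) (b := idx + (m : Int))
        (by omega)
      rw [← h]; congr 1; push_cast; ring
    rw [hsplit, List.foldl_append, List.map_append, ih]
    have hlast : (((m + 1 : Nat) : Int) - (idx + (m : Int) - idx) - 1).toNat = 0 := by
      omega
    have hmap : (PySem.List.pyRange idx (idx + (m : Int)) 1).map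
          (fun i => t i * z ^ (((m + 1 : Nat) : Int) - (i - idx) - 1).toNat)
        = (PySem.List.pyRange idx (idx + (m : Int)) 1).map
          (fun i => (t i * z ^ (((m : Nat) : Int) - (i - idx) - 1).toNat) * z) := by
      apply List.map_congr_left
      intro i hi
      rw [PySem.List.mem_pyRange_one] at hi
      have he : (((m + 1 : Nat) : Int) - (i - idx) - 1).toNat
          = (((m : Nat) : Int) - (i - idx) - 1).toNat + 1 := by omega
      rw [he, pow_succ]; ring
    simp only [List.foldl_cons, List.foldl_nil, List.map_cons, List.map_nil, List.sum_append,
      List.sum_cons, List.sum_nil, hlast]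
    rw [hmap, pv_sum_map_mul (PySem.List.pyRange idx (idx + (m : Int)) 1)
      (fun i => t i * z ^ (((m : Nat) : Int) - (i - idx) - 1).toNat) z]
    rw [pow_succ]
    ring

-- per-group: A's weighted sum equals B's Horner label
theorem pv_label_eq (tensor : List Int) (z n idx : Int) :
    (PySem.List.pyRange idx (n + idx) 1).foldl
        (fun s i => s + PySem.List.pyGetD tensor i 0 * z ^ (n - (i - idx) - 1).toNat) 0
      = pvB_label_of tensor z idx n := by
  unfold pvB_label_of
  rcases le_or_gt n 0 with hn | hn
  · rw [PySem.List.pyRange_one_eq_nil (by omega), PySem.List.pyRange_one_eq_nil (by omega)]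
    rfl
  · have hm : ((n.toNat : Nat) : Int) = n := Int.toNat_of_nonneg (le_of_lt hn)
    rw [← hm, show ((n.toNat : Int) + idx : Int) = idx + (n.toNat : Int) from by ring,
      PySem.List.foldl_add, pv_horner (fun i => PySem.List.pyGetD tensor i 0) z n.toNat idx 0]
    simp only [zero_mul, zero_add]

-- A's loop produces exactly B's map over (start, size) pairs
theorem pv_loop_eq (tensor : List Int) (z : Int) (gs : List Int) : ∀ (idx : Int) (acc : List Int),
    pvA_loop tensor z gs idx acc
      = acc ++ ((pvStarts idx gs).zip gs).map (fun p => pvB_label_of tensor z p.1 p.2) := by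
  induction gs with
  | nil => intro idx acc; simp [pvA_loop, pvStarts]
  | cons n rest ih =>
    intro idx acc
    simp only [pvA_loop, pvStarts, List.zip_cons_cons, List.map_cons]
    rw [ih (idx + n) (acc ++ [_]), pv_label_eq]
    simp

-- ===== VERDICT (by name: the statement is the Claim_ definition above) =====
theorem tensor_to_label_grouped_spec : Claim_equal_tensor_to_label_grouped := by
  intro tensor z_dim groups _ _
  unfold Spec_tensor_to_label_grouped tensor_to_label_grouped tensor_to_label_grouped_alt
  rw [pv_loop_eq]
  have h := pv_starts_fold groups [] 0
  simp only [List.nil_append] at h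
  rw [h]
  rfl
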